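-- pv_equiv track=rewrite | github.com/nicoletanyt/AOC | 2024/DAY 2/part2.py | returnError
-- ===== SOURCE A (Python) =====
-- def returnError(report):
--     direction = -1 # 0 is increasing, 1 is decreasing
--
--     for level in range(0, len(report) - 1):
--         # if same, not safe
--         diff = abs(report[level + 1] - report[level])
--         if diff >= 1 and diff <= 3:
--             if report[level + 1] > report[level]:
--                 # increasing
--                 if direction == 1:
--                     # different direction
--                     return level
--                 direction = 0
--             else:
--                 # decreasing
--                 if direction == 0:
--                     # different direction
--                     return level
--                 direction = 1
--         else:
--             # difference is > 3 or < 1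
--             return level
--
--     return -1
-- ===== SOURCE B (Python) =====
-- def returnError(report):
--     n = len(report)
--     if n < 2:
--         return -1
--     diffs = [report[i + 1] - report[i] for i in range(n - 1)]
--     up = diffs[0] > 0
--     mag = [i for i, d in enumerate(diffs) if not (1 <= abs(d) <= 3)]
--     wrongdir = [i for i, d in enumerate(diffs) if (d > 0) != up]
--     cands = mag + wrongdir
--     return min(cands) if cands else -1
-- ===== Notes on version B (the rewrite author's own statement) =====
-- stated objective: alternative
-- what changed: Replaces A's single stateful early-return scan (mutable direction flag updated per pair) by staged passes: build the list of consecutive differences, independently collect the full index lists violating the magnitude rule and the first-pair direction rule, and return the minimum candidate index (or -1 if none).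
import Mathlib
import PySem

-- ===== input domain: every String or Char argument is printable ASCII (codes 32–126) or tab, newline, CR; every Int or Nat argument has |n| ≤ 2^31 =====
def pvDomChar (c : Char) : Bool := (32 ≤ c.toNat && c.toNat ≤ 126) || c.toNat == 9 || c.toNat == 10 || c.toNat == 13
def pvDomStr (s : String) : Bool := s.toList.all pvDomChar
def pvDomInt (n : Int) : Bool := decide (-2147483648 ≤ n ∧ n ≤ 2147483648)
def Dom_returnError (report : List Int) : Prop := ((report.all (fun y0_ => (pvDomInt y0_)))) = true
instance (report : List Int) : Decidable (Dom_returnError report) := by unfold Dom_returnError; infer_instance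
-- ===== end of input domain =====

-- B replaces A's stateful early-return scan by staged passes: build the diff list,
-- collect the violating-index lists of the two rules independently, return their
-- minimum (alternative decomposition; same O(n) cost).

-- ===== PORT A =====
-- the for-loop over range(0, len(report)-1) with early returns and the mutable
-- 'direction' state; report[level] is in range at every access, so .getD 0 is exact
def loopA (report : List Int) : List Int → Int → Int
  | [], _ => -1
  | level :: rest, direction =>
    let diff := |(PySem.List.pyGet? report (level + 1)).getD 0 -
                 (PySem.List.pyGet? report level).getD 0|
    if 1 ≤ diff ∧ diff ≤ 3 then
      if (PySem.List.pyGet? report level).getD 0 <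
         (PySem.List.pyGet? report (level + 1)).getD 0 then
        if direction = 1 then level else loopA report rest 0
      else
        if direction = 0 then level else loopA report rest 1
    else level

def returnError (report : List Int) : Int :=
  loopA report (PySem.List.pyRange 0 ((report.length : Int) - 1) 1) (-1)

-- ===== PORT B =====
def returnError_alt (report : List Int) : Int :=
  if report.length < 2 then -1
  else
    let diffs := (PySem.List.pyRange 0 ((report.length : Int) - 1) 1).map
      (fun i => (PySem.List.pyGet? report (i + 1)).getD 0 -
                (PySem.List.pyGet? report i).getD 0)
    let up := decide (0 < (PySem.List.pyGet? diffs 0).getD 0)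
    let mag := ((PySem.List.enumerate diffs 0).filter
      (fun q => !(decide (1 ≤ |q.2|) && decide (|q.2| ≤ 3)))).map (·.1)
    let wrongdir := ((PySem.List.enumerate diffs 0).filter
      (fun q => decide (0 < q.2) != up)).map (·.1)
    let cands := mag ++ wrongdir
    match PySem.List.min? cands (fun x => x) with
    | some m => m
    | none => -1

-- ===== PRECONDITION & SPEC =====
def Spec_returnError (report : List Int) (out : Int) : Prop := out = returnError_alt report
instance (report : List Int) (out : Int) : Decidable (Spec_returnError report out) := by unfold Spec_returnError; infer_instance

-- ===== CLAIM (what is proved, stated in full; the proofs are below) =====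
def Claim_equal_returnError : Prop := ∀ (report : List Int), Dom_returnError report → Spec_returnError report (returnError report)

-- ===== LEMMAS AND PROOFS =====

-- the per-pair predicates of B, over a single difference
def Pmag (d : Int) : Bool := !(decide (1 ≤ |d|) && decide (|d| ≤ 3))
def Qdir (up : Bool) (d : Int) : Bool := decide (0 < d) != up

-- A's violation predicate on an adjacent pair, given the reference direction
def badPair (incr : Bool) (p : Int × Int) : Bool :=
  let d := p.2 - p.1
  !(decide (1 ≤ |d|) && decide (|d| ≤ 3)) || (decide (p.1 < p.2) != incr)

-- a structural mirror of A's loop over the suffix of the report, used only in proofs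
def scanA : Int → List Int → Option Nat
  | _, [] => none
  | _, [_] => none
  | d, a :: b :: r =>
    if 1 ≤ |b - a| ∧ |b - a| ≤ 3 then
      if a < b then
        if d = 1 then some 0 else (scanA 0 (b :: r)).map (· + 1)
      else
        if d = 0 then some 0 else (scanA 1 (b :: r)).map (· + 1)
    else some 0

lemma drop_cons_get (report : List Int) (k : Nat) (a : Int) (t : List Int)
    (h : report.drop k = a :: t) :
    PySem.List.pyGet? report (k : Int) = some a ∧ report.drop (k + 1) = t := by
  constructor
  · rw [PySem.List.pyGet?_natCast]
    have h2 : (report.drop k)[0]? = report[k + 0]? := List.getElem?_drop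
    rw [h] at h2
    simpa using h2.symm
  · have : (report.drop k).tail = t := by simp [h]
    simpa [List.tail_drop] using this

lemma loopA_eq_scanA (report : List Int) :
    ∀ (rest : List Int) (k : Nat) (d : Int), report.drop k = rest →
      loopA report (PySem.List.pyRange (k : Int) ((report.length : Int) - 1) 1) d =
        (match scanA d rest with
         | some i => ((k + i : Nat) : Int)
         | none => -1) := by
  intro rest
  induction rest with
  | nil =>
    intro k d h
    have hk : report.length ≤ k := by
      have := congrArg List.length h; simp at this; omega
    rw [PySem.List.pyRange_one_eq_nil (by omega)]
    simp [loopA, scanA]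
  | cons a t ih =>
    intro k d h
    obtain ⟨ha, hdrop⟩ := drop_cons_get report k a t h
    match t with
    | [] =>
      have hk : report.length = k + 1 := by
        have := congrArg List.length h; simp at this; omega
      rw [PySem.List.pyRange_one_eq_nil (by omega)]
      simp [loopA, scanA]
    | b :: r =>
      have hlen : k + 2 ≤ report.length := by
        have := congrArg List.length h; simp at this; omega
      obtain ⟨hb, _⟩ := drop_cons_get report (k + 1) b r hdrop
      rw [PySem.List.pyRange_one_cons (by omega)]
      have hb' : PySem.List.pyGet? report ((k : Int) + 1) = some b := by
        have : ((k : Int) + 1) = ((k + 1 : Nat) : Int) := by push_cast; ring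
        rw [this]; exact hb
      have ihspec := fun d' => ih (k + 1) d' hdrop
      simp only [loopA, ha, hb', Option.getD_some]
      by_cases hc : 1 ≤ |b - a| ∧ |b - a| ≤ 3
      · by_cases hab : a < b
        · by_cases hd : d = 1
          · simp [scanA, hc, hab, hd]
          · have := ihspec 0
            simp only [scanA, if_pos hc, if_pos hab, if_neg hd]
            rw [show ((k : Int) + 1) = ((k + 1 : Nat) : Int) by push_cast; ring, this]
            cases hsc : scanA 0 (b :: r) with
            | none => simp
            | some i => simp; ring
        · by_cases hd : d = 0
          · simp [scanA, hc, hab, hd]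
          · have := ihspec 1
            simp only [scanA, if_pos hc, if_neg hab, if_neg hd]
            rw [show ((k : Int) + 1) = ((k + 1 : Nat) : Int) by push_cast; ring, this]
            cases hsc : scanA 1 (b :: r) with
            | none => simp
            | some i => simp; ring
      · simp [scanA, hc]

lemma badPair_of_not (incr : Bool) (a b : Int) (hc : ¬ (1 ≤ |b - a| ∧ |b - a| ≤ 3)) :
    badPair incr (a, b) = true := by
  simp [badPair]
  left
  by_cases h1 : 1 ≤ |b - a|
  · right; omega
  · left
    have := abs_nonneg (b - a)
    exact abs_eq_zero.mp (by omega)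

lemma scanA_eq_findIdx (incr : Bool) :
    ∀ (l : List Int),
      scanA (if incr then 0 else 1) l = (l.zip l.tail).findIdx? (badPair incr) := by
  intro l
  induction l with
  | nil => simp [scanA]
  | cons a t ih =>
    match t with
    | [] => simp [scanA]
    | b :: r =>
      have htail : (a :: b :: r).tail = b :: r := rfl
      rw [htail]
      have hz : (a :: b :: r).zip (b :: r) = (a, b) :: (b :: r).zip r := rfl
      rw [hz, List.findIdx?_cons]
      have hz2 : (b :: r).zip r = (b :: r).zip ((b :: r).tail) := rfl
      by_cases hc : 1 ≤ |b - a| ∧ |b - a| ≤ 3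
      · by_cases hab : a < b
        · cases incr with
          | true =>
            have hbad : badPair true (a, b) = false := by
              simp [badPair, hab, hc.1, hc.2]
            rw [hbad]
            simp only [scanA, if_pos hc, if_pos hab]
            norm_num
            rw [hz2, ← ih]
            simp
          | false =>
            have hbad : badPair false (a, b) = true := by
              simp [badPair, hab]
            rw [hbad]
            simp [scanA, hc, hab]
        · cases incr with
          | true =>
            have hbad : badPair true (a, b) = true := by
              simp [badPair, hab]
            rw [hbad]
            simp [scanA, hc, hab]
          | false =>
            have hbad : badPair false (a, b) = false := by
              simp [badPair, hab, hc.1, hc.2]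
            rw [hbad]
            simp only [scanA, if_pos hc, if_neg hab]
            norm_num
            rw [hz2, ← ih]
            simp
      · rw [badPair_of_not incr a b hc]
        simp [scanA, hc]

lemma scanA_start (a b : Int) (r : List Int) :
    scanA (-1) (a :: b :: r) =
      ((a :: b :: r).zip ((a :: b :: r).tail)).findIdx? (badPair (decide (a < b))) := by
  have hz : (a :: b :: r).zip (b :: r) = (a, b) :: (b :: r).zip r := rfl
  show scanA (-1) (a :: b :: r) = List.findIdx? _ ((a, b) :: (b :: r).zip r)
  rw [List.findIdx?_cons]
  by_cases hc : 1 ≤ |b - a| ∧ |b - a| ≤ 3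
  · have hbad : badPair (decide (a < b)) (a, b) = false := by
      simp [badPair, hc.1, hc.2]
    rw [hbad]
    by_cases hab : a < b
    · simp only [scanA, if_pos hc, if_pos hab]
      norm_num [hab]
      have := scanA_eq_findIdx true (b :: r)
      norm_num at this
      rw [this]
    · simp only [scanA, if_pos hc, if_neg hab]
      norm_num [hab]
      have := scanA_eq_findIdx false (b :: r)
      norm_num at this
      rw [this]
  · rw [badPair_of_not (decide (a < b)) a b hc]
    simp [scanA, hc]

-- every candidate index collected from enumerate t s is ≥ s
lemma cand_ge (p : Int → Bool) (t : List Int) (s : Int) :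
    ∀ x ∈ ((PySem.List.enumerate t s).filter (fun q => p q.2)).map (Prod.fst), s ≤ x := by
  intro x hx
  simp only [List.mem_map, List.mem_filter] at hx
  obtain ⟨q, ⟨hq, _⟩, hx⟩ := hx
  rw [PySem.List.mem_enumerate_iff] at hq
  obtain ⟨k, hk, rfl⟩ := hq
  subst hx
  simp

lemma min?_eq_of_mem_le (l : List Int) (s : Int) (hmem : s ∈ l)
    (hle : ∀ x ∈ l, s ≤ x) : PySem.List.min? l (fun x => x) = some s := by
  cases h : PySem.List.min? l (fun x => x) with
  | none =>
    rw [PySem.List.min?_eq_none_iff] at h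
    subst h; simp at hmem
  | some m =>
    have hm : m ∈ l := PySem.List.min?_mem h
    have h1 : m ≤ s := PySem.List.min?_isMin h s hmem
    have h2 : s ≤ m := hle m hm
    have : m = s := le_antisymm h1 h2
    rw [this]

-- min of the union of the two candidate lists = first index violating either rule
lemma union_min (P Q : Int → Bool) :
    ∀ (D : List Int) (s : Int),
      PySem.List.min?
        (((PySem.List.enumerate D s).filter (fun q => P q.2)).map (Prod.fst) ++
         ((PySem.List.enumerate D s).filter (fun q => Q q.2)).map (Prod.fst))
        (fun x => x)
      = (D.findIdx? (fun d => P d || Q d)).map (fun i : Nat => s + (i : Int)) := by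
  intro D
  induction D with
  | nil =>
    intro s
    rw [PySem.List.enumerate_nil]
    simp

  | cons d t ih =>
    intro s
    rw [PySem.List.enumerate_cons, List.findIdx?_cons]
    have hgeP := cand_ge P t (s + 1)
    have hgeQ := cand_ge Q t (s + 1)
    cases hP : P d with
    | true =>
      have h1 : ((((s, d) :: PySem.List.enumerate t (s + 1)).filter (fun q => P q.2)).map Prod.fst) =
          s :: (((PySem.List.enumerate t (s + 1)).filter (fun q => P q.2)).map Prod.fst) := by
        simp [List.filter_cons, hP]
      cases hQ : Q d with
      | true =>
        have h2 : ((((s, d) :: PySem.List.enumerate t (s + 1)).filter (fun q => Q q.2)).map Prod.fst) =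
            s :: (((PySem.List.enumerate t (s + 1)).filter (fun q => Q q.2)).map Prod.fst) := by
          simp [List.filter_cons, hQ]
        rw [h1, h2, min?_eq_of_mem_le _ s (by simp) ?_]
        · simp [hP]
        · intro x hx
          rcases List.mem_append.mp hx with h | h
          · rcases List.mem_cons.mp h with h' | h'
            · omega
            · have := hgeP x h'; omega
          · rcases List.mem_cons.mp h with h' | h'
            · omega
            · have := hgeQ x h'; omega
      | false =>
        have h2 : ((((s, d) :: PySem.List.enumerate t (s + 1)).filter (fun q => Q q.2)).map Prod.fst) =
            (((PySem.List.enumerate t (s + 1)).filter (fun q => Q q.2)).map Prod.fst) := by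
          simp [List.filter_cons, hQ]
        rw [h1, h2, min?_eq_of_mem_le _ s (by simp) ?_]
        · simp [hP]
        · intro x hx
          rcases List.mem_append.mp hx with h | h
          · rcases List.mem_cons.mp h with h' | h'
            · omega
            · have := hgeP x h'; omega
          · have := hgeQ x h; omega
    | false =>
      have h1 : ((((s, d) :: PySem.List.enumerate t (s + 1)).filter (fun q => P q.2)).map Prod.fst) =
          (((PySem.List.enumerate t (s + 1)).filter (fun q => P q.2)).map Prod.fst) := by
        simp [List.filter_cons, hP]
      cases hQ : Q d with
      | true =>
        have h2 : ((((s, d) :: PySem.List.enumerate t (s + 1)).filter (fun q => Q q.2)).map Prod.fst) =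
            s :: (((PySem.List.enumerate t (s + 1)).filter (fun q => Q q.2)).map Prod.fst) := by
          simp [List.filter_cons, hQ]
        rw [h1, h2, min?_eq_of_mem_le _ s (by simp) ?_]
        · simp [hP, hQ]
        · intro x hx
          rcases List.mem_append.mp hx with h | h
          · have := hgeP x h; omega
          · rcases List.mem_cons.mp h with h' | h'
            · omega
            · have := hgeQ x h'; omega
      | false =>
        have h2 : ((((s, d) :: PySem.List.enumerate t (s + 1)).filter (fun q => Q q.2)).map Prod.fst) =
            (((PySem.List.enumerate t (s + 1)).filter (fun q => Q q.2)).map Prod.fst) := by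
          simp [List.filter_cons, hQ]
        rw [h1, h2, ih (s + 1)]
        simp [hP, hQ, Option.map_map]
        cases t.findIdx? (fun d => P d || Q d) with
        | none => rfl
        | some i => simp [Function.comp]; push_cast; ring

-- the pyRange/pyGet? diff list IS the list of adjacent differences
lemma diffs_eq (l : List Int) :
    (PySem.List.pyRange 0 ((l.length : Int) - 1) 1).map
      (fun i => (PySem.List.pyGet? l (i + 1)).getD 0 - (PySem.List.pyGet? l i).getD 0)
    = (l.zip l.tail).map (fun p => p.2 - p.1) := by
  apply List.ext_getElem
  · simp [PySem.List.length_pyRange_one, List.length_zip]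
  · intro k h1 h2
    simp only [List.getElem_map]
    rw [PySem.List.getElem_pyRange_one]
    have hk1 : k + 1 < l.length := by
      simp [PySem.List.length_pyRange_one] at h1
      omega
    have hklt : k < (l.zip l.tail).length := by
      simp [List.length_zip, List.length_tail]
      omega
    have hz : (l.zip l.tail)[k]'hklt = (l[k]'(by omega), l.tail[k]'(by simp [List.length_tail]; omega)) :=
      List.getElem_zip
    rw [hz]
    have htl : l.tail[k]'(by simp [List.length_tail]; omega) = l[k + 1]'hk1 := by
      simp [List.getElem_tail]
    rw [htl]
    have g1 : PySem.List.pyGet? l ((0 : Int) + k + 1) = some (l[k + 1]'hk1) := by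
      have : ((0 : Int) + k + 1) = ((k + 1 : Nat) : Int) := by push_cast; ring
      rw [this, PySem.List.pyGet?_natCast]
      simp [List.getElem?_eq_getElem hk1]
    have g0 : PySem.List.pyGet? l ((0 : Int) + k) = some (l[k]'(by omega)) := by
      have : ((0 : Int) + k) = ((k : Nat) : Int) := by push_cast; ring
      rw [this, PySem.List.pyGet?_natCast]
      simp [List.getElem?_eq_getElem (show k < l.length by omega)]
    rw [g1, g0]
    simp

lemma badPair_eq_PQ (up : Bool) (p : Int × Int) :
    badPair up p = (Pmag (p.2 - p.1) || Qdir up (p.2 - p.1)) := by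
  simp only [badPair, Pmag, Qdir]
  have : decide (p.1 < p.2) = decide (0 < p.2 - p.1) := by
    simp only [decide_eq_decide]; omega
  rw [this]

-- ===== VERDICT (by name: the statement is the Claim_ definition above) =====
theorem returnError_spec : Claim_equal_returnError := by
  intro report _
  unfold Spec_returnError returnError
  have hA := loopA_eq_scanA report report 0 (-1) (by simp)
  simp only [Nat.cast_zero] at hA
  rw [hA]
  unfold returnError_alt
  match report with
  | [] => simp [scanA]
  | [a] => simp [scanA]
  | a :: b :: r =>
    have hlen : ¬ (a :: b :: r).length < 2 := by simp
    rw [if_neg hlen]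
    simp only [diffs_eq]
    have hzip : (a :: b :: r).zip ((a :: b :: r).tail) = (a, b) :: (b :: r).zip r := rfl
    rw [hzip]
    have hfirst : (PySem.List.pyGet? (((a, b) :: (b :: r).zip r).map (fun p => p.2 - p.1)) 0).getD 0 = b - a := by
      simp [PySem.List.pyGet?_zero_cons]
    rw [hfirst]
    have hup : decide (0 < b - a) = decide (a < b) := by
      simp only [decide_eq_decide]; omega
    rw [hup]
    rw [union_min (fun d => !(decide (1 ≤ |d|) && decide (|d| ≤ 3)))
          (fun d => decide (0 < d) != decide (a < b)) _ 0]
    rw [List.findIdx?_map]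
    have hpred : ((fun d => (!(decide (1 ≤ |d|) && decide (|d| ≤ 3))) || (decide (0 < d) != decide (a < b))) ∘ (fun p : Int × Int => p.2 - p.1)) = badPair (decide (a < b)) := by
      funext p
      simp only [Function.comp]
      exact (badPair_eq_PQ (decide (a < b)) p).symm
    rw [hpred]
    rw [scanA_start a b r, hzip]
    cases hf : List.findIdx? (badPair (decide (a < b))) ((a, b) :: (b :: r).zip r) with
    | none => simp [hf]
    | some i => simp [hf]
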